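-- pv_equiv track=rewrite | github.com/mihaigalos/cimbar-tiles-generator | src/hamming.py | _diff_tile
-- ===== SOURCE A (Python) =====
-- def _diff_tile(tile1, tile2) -> int:
--     hamming_distance = 0
--     for pixel1 in tile1:
--         if pixel1 == '\n' or pixel1 == '\r':
--             continue
--         for pixel2 in tile2:
--             if pixel2 == '\n' or pixel2 == '\r':
--                 continue
--             if pixel1 != pixel2:
--                 hamming_distance += 1
--     return hamming_distance
-- ===== SOURCE B (Python) =====
-- def _diff_tile(tile1, tile2) -> int:
--     # One pass over tile2 builds a frequency table; one pass over tile1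
--     # adds, per pixel, the number of tile2 pixels it differs from.
--     counts = {}
--     m = 0
--     for pixel2 in tile2:
--         if pixel2 == '\n' or pixel2 == '\r':
--             continue
--         counts[pixel2] = counts.get(pixel2, 0) + 1
--         m += 1
--     hamming_distance = 0
--     for pixel1 in tile1:
--         if pixel1 == '\n' or pixel1 == '\r':
--             continue
--         hamming_distance += m - counts.get(pixel1, 0)
--     return hamming_distance
-- ===== Notes on version B (the rewrite author's own statement) =====
-- stated objective: faster
-- what changed: Replaces the nested O(n*m) comparison loops by a single pass building a frequency table of tile2's pixels, then one pass over tile1 adding (m - count of matching pixels) per pixel.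
import Mathlib
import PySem

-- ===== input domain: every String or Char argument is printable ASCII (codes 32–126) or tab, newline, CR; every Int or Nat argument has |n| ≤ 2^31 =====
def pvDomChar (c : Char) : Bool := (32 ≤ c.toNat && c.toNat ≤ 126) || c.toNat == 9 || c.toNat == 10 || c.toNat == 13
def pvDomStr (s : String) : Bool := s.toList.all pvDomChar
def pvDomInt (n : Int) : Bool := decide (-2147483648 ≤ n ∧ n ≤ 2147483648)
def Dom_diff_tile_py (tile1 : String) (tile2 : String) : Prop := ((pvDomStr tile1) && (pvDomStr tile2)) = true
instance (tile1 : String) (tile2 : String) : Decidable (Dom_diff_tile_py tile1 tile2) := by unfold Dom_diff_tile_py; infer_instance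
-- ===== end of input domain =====

-- B replaces A's nested O(n*m) comparison loops by a frequency table of tile2's
-- pixels plus one pass over tile1 (objective: faster, asymptotic).

-- ===== PORT A =====
def diff_tile_py (tile1 : String) (tile2 : String) : Int :=
  tile1.toList.foldl (fun acc p1 =>
    if p1 = '\n' ∨ p1 = '\r' then acc
    else tile2.toList.foldl (fun acc2 p2 =>
      if p2 = '\n' ∨ p2 = '\r' then acc2
      else if p1 ≠ p2 then acc2 + 1 else acc2) acc) 0

-- ===== PORT B =====
def diff_tile_py_alt (tile1 : String) (tile2 : String) : Int :=
  let s := tile2.toList.foldl (fun s p2 =>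
    if p2 = '\n' ∨ p2 = '\r' then s
    else (s.1.insert p2 (s.1.getD p2 0 + 1), s.2 + 1))
    ((PySem.Dict.empty : PySem.Dict Char Int), (0 : Int))
  tile1.toList.foldl (fun h p1 =>
    if p1 = '\n' ∨ p1 = '\r' then h
    else h + (s.2 - s.1.getD p1 0)) 0

-- ===== PRECONDITION & SPEC =====
def Spec_diff_tile_py (tile1 : String) (tile2 : String) (out : Int) : Prop := out = diff_tile_py_alt tile1 tile2
instance (tile1 : String) (tile2 : String) (out : Int) : Decidable (Spec_diff_tile_py tile1 tile2 out) := by unfold Spec_diff_tile_py; infer_instance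

-- ===== CLAIM (what is proved, stated in full; the proofs are below) =====
def Claim_equal_diff_tile_py : Prop := ∀ (tile1 : String) (tile2 : String), Dom_diff_tile_py tile1 tile2 → Spec_diff_tile_py tile1 tile2 (diff_tile_py tile1 tile2)

-- ===== LEMMAS AND PROOFS =====

-- characters A/B actually count (not newline / carriage return)
def pvKeep (l : List Char) : List Char := l.filter (fun c => !(c = '\n' || c = '\r'))

lemma pvKeep_cons_skip {c : Char} (t : List Char) (hc : c = '\n' ∨ c = '\r') :
    pvKeep (c :: t) = pvKeep t := by
  rcases hc with h | h <;> simp [pvKeep, h]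

lemma pvKeep_cons_keep {c : Char} (t : List Char) (hc : ¬(c = '\n' ∨ c = '\r')) :
    pvKeep (c :: t) = c :: pvKeep t := by
  simp only [not_or] at hc
  simp [pvKeep, hc.1, hc.2]

-- B's first loop: the running total counts the kept characters, the dict counts each one
lemma build_spec (l : List Char) (d : PySem.Dict Char Int) (m : Int) :
    (l.foldl (fun s p2 =>
        if p2 = '\n' ∨ p2 = '\r' then s
        else (s.1.insert p2 (s.1.getD p2 0 + 1), s.2 + 1)) (d, m)).2
      = m + ((pvKeep l).length : Int)
    ∧ ∀ p, (l.foldl (fun s p2 =>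
        if p2 = '\n' ∨ p2 = '\r' then s
        else (s.1.insert p2 (s.1.getD p2 0 + 1), s.2 + 1)) (d, m)).1.getD p 0
      = d.getD p 0 + (((pvKeep l).count p : Int)) := by
  induction l generalizing d m with
  | nil => simp [pvKeep]
  | cons c t ih =>
    by_cases hc : c = '\n' ∨ c = '\r'
    · simp only [List.foldl_cons, if_pos hc, pvKeep_cons_skip t hc]
      exact ih d m
    · simp only [List.foldl_cons, if_neg hc, pvKeep_cons_keep t hc]
      refine ⟨?_, ?_⟩
      · rw [(ih _ _).1]; simp; ring
      · intro p
        rw [(ih _ _).2 p, PySem.Dict.getD_insert]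
        by_cases hp : p = c
        · subst hp; simp; ring
        · simp [hp, List.count_cons]
          intro h; exact absurd h.symm hp

-- A's inner loop over tile2 from accumulator acc
lemma inner_spec (p : Char) (l : List Char) (acc : Int) :
    l.foldl (fun acc2 p2 =>
        if p2 = '\n' ∨ p2 = '\r' then acc2
        else if p ≠ p2 then acc2 + 1 else acc2) acc
      = acc + ((pvKeep l).length : Int) - ((pvKeep l).count p : Int) := by
  induction l generalizing acc with
  | nil => simp [pvKeep]
  | cons c t ih =>
    by_cases hc : c = '\n' ∨ c = '\r'
    · simp only [List.foldl_cons, if_pos hc, pvKeep_cons_skip t hc]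
      exact ih acc
    · simp only [List.foldl_cons, if_neg hc, pvKeep_cons_keep t hc]
      by_cases hp : p = c
      · subst hp
        rw [if_neg (by simp), ih]
        simp; ring
      · rw [if_pos hp, ih]
        have : List.count p (c :: pvKeep t) = List.count p (pvKeep t) := by
          simp [List.count_cons]; intro h; exact absurd h.symm hp
        rw [this]; simp; ring

-- both outer loops add the same per-character amount, so they agree from any accumulator
lemma outer_spec (l1 l2 : List Char) (acc : Int) :
    l1.foldl (fun acc p1 =>
      if p1 = '\n' ∨ p1 = '\r' then acc
      else l2.foldl (fun acc2 p2 =>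
        if p2 = '\n' ∨ p2 = '\r' then acc2
        else if p1 ≠ p2 then acc2 + 1 else acc2) acc) acc
    = l1.foldl (fun h p1 =>
      if p1 = '\n' ∨ p1 = '\r' then h
      else h + (((l2.foldl (fun s p2 =>
          if p2 = '\n' ∨ p2 = '\r' then s
          else (s.1.insert p2 (s.1.getD p2 0 + 1), s.2 + 1))
          ((PySem.Dict.empty : PySem.Dict Char Int), (0 : Int))).2
        - (l2.foldl (fun s p2 =>
          if p2 = '\n' ∨ p2 = '\r' then s
          else (s.1.insert p2 (s.1.getD p2 0 + 1), s.2 + 1))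
          ((PySem.Dict.empty : PySem.Dict Char Int), (0 : Int))).1.getD p1 0))) acc := by
  induction l1 generalizing acc with
  | nil => rfl
  | cons c t ih =>
    by_cases hc : c = '\n' ∨ c = '\r'
    · simp only [List.foldl_cons, if_pos hc]; exact ih acc
    · simp only [List.foldl_cons, if_neg hc]
      rw [ih]
      refine congrArg (fun x => List.foldl _ x t) ?_
      rw [inner_spec, (build_spec l2 PySem.Dict.empty 0).1,
          (build_spec l2 PySem.Dict.empty 0).2 c, PySem.Dict.getD_empty]
      ring

-- ===== VERDICT (by name: the statement is the Claim_ definition above) =====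
theorem diff_tile_py_spec : Claim_equal_diff_tile_py := by
  intro tile1 tile2 _
  unfold Spec_diff_tile_py diff_tile_py diff_tile_py_alt
  exact outer_spec tile1.toList tile2.toList 0
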